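-- pv_equiv track=rewrite | github.com/Qaqarot/OpenFermion-Blueqat | openfermionblueqat/bk.py | get_parity_set
-- ===== SOURCE A (Python) =====
-- def get_parity_set(index):
--     """Make parity set"""
--     n = 1
--     while n <= index:
--         n *= 2
--
--     def get(n, j):
--         if j <= 1:
--             return {b for b in range(j)}
--         n_half = n // 2
--         if j < n_half:
--             return get(n_half, j)
--         p = {b + n_half for b in get(n_half, j - n_half)}
--         p.add(n_half - 1)
--         return p
--
--     return get(n, index)
-- ===== SOURCE B (Python) =====
-- def get_parity_set(index):
--     """Make parity set"""
--     result = set()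
--     bit = 1
--     while bit <= index:
--         if (index // bit) % 2 == 1:
--             result.add((index // (2 * bit)) * (2 * bit) + bit - 1)
--         bit *= 2
--     return result
-- ===== Notes on version B (the rewrite author's own statement) =====
-- stated objective: alternative
-- what changed: Replaces the recursive halving of an explicit power-of-two bound (which rebuilds and shifts the whole set at every level) with a single low-to-high loop over the bits of index that emits each parity-set element by a direct floordiv formula.
import Mathlib
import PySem

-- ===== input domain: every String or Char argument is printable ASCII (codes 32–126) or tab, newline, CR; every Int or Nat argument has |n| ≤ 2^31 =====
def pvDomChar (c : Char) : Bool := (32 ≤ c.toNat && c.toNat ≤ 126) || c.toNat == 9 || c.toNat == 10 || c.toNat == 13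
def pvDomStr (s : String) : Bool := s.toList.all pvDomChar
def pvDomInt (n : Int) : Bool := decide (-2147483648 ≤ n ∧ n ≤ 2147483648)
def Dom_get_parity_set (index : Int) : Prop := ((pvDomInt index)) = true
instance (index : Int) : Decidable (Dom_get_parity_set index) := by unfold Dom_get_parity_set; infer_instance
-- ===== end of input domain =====

-- B replaces A's recursive halving of a power-of-two bound with one low-to-high loop over the
-- bits of index computing each element directly (alternative decomposition, same set).

-- ===== PORT A =====
-- the 'while n <= index: n *= 2' loop (fuel is only a totality guard; 64 doublings suffice on Dom)
def pvFindN : Nat → Int → Int → Int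
  | 0, n, _ => n
  | f+1, n, index => if n ≤ index then pvFindN f (n * 2) index else n

-- the inner recursive 'get(n, j)' (fuel is only a totality guard; on Dom the base case is
-- always reached first, since n halves at each call)
def pvGetA : Nat → Int → Int → List Int
  | fuel, n, j =>
    if j ≤ 1 then PySem.Set.ofList (PySem.List.pyRange 0 j 1)
    else
      match fuel with
      | 0 => []
      | f+1 =>
        let h := PySem.Int.floordiv n 2
        if j < h then pvGetA f h j
        else PySem.Set.add (PySem.Set.ofList ((pvGetA f h (j - h)).map (· + h))) (h - 1)

def get_parity_set (index : Int) : List Int :=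
  pvGetA 64 (pvFindN 64 1 index) index

-- ===== PORT B =====
-- the 'while bit <= index' loop of Source B (fuel is only a totality guard; 64 doublings suffice on Dom)
def pvLoopB : Nat → Int → Int → PySem.Set Int → List Int
  | 0, _, _, acc => acc
  | f+1, bit, index, acc =>
    if bit ≤ index then
      pvLoopB f (bit * 2) index
        (if PySem.Int.mod (PySem.Int.floordiv index bit) 2 = 1 then
          PySem.Set.add acc (PySem.Int.floordiv index (2 * bit) * (2 * bit) + bit - 1)
        else acc)
    else acc

def get_parity_set_alt (index : Int) : List Int :=
  pvLoopB 64 1 index PySem.Set.empty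

-- ===== PRECONDITION & SPEC =====
def Spec_get_parity_set (index : Int) (out : List Int) : Prop := out = get_parity_set_alt index
instance (index : Int) (out : List Int) : Decidable (Spec_get_parity_set index out) := by unfold Spec_get_parity_set; infer_instance

-- ===== CLAIM (what is proved, stated in full; the proofs are below) =====
def Claim_equal_get_parity_set : Prop := ∀ (index : Int), Dom_get_parity_set index → Spec_get_parity_set index (get_parity_set index)

-- ===== LEMMAS AND PROOFS =====

-- the common value: the parity set of j, listed lowest bit first (proof-only spec function)
def pvS (j : Int) : List Int :=
  if j ≤ 0 then []
  else (if j % 2 = 1 then [j - 1] else []) ++ (pvS (j / 2)).map (fun e => 2 * e + 1)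
termination_by j.toNat
decreasing_by omega

theorem pvS_nonpos {j : Int} (h : j ≤ 0) : pvS j = [] := by
  rw [pvS]; simp [h]

theorem pvS_pos {j : Int} (h : 0 < j) :
    pvS j = (if j % 2 = 1 then [j - 1] else []) ++ (pvS (j / 2)).map (fun e => 2 * e + 1) := by
  rw [pvS, if_neg (by omega)]

theorem pvS_mem_bounds (j : Int) : ∀ e ∈ pvS j, 0 ≤ e ∧ e < j := by
  by_cases h : j ≤ 0
  · simp [pvS_nonpos h]
  · rw [pvS_pos (by omega)]
    intro e he
    rcases List.mem_append.mp he with h2 | h2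
    · split at h2 <;> simp at h2; omega
    · obtain ⟨b, hb, rfl⟩ := List.mem_map.mp h2
      have := pvS_mem_bounds (j / 2) b hb
      omega
termination_by j.toNat
decreasing_by omega

theorem pvS_pairwise (j : Int) : (pvS j).Pairwise (· > ·) := by
  by_cases h : j ≤ 0
  · simp [pvS_nonpos h]
  · rw [pvS_pos (by omega)]
    rw [List.pairwise_append]
    refine ⟨?_, ?_, ?_⟩
    · split <;> simp
    · exact (List.pairwise_map).mpr ((pvS_pairwise (j / 2)).imp (by intro a b hab; omega))
    · intro a ha b hb
      have hj : j % 2 = 1 := by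
        split at ha
        · assumption
        · simp at ha
      rw [if_pos hj] at ha
      simp at ha
      obtain ⟨c, hc, rfl⟩ := List.mem_map.mp hb
      have := pvS_mem_bounds (j / 2) c hc
      omega
termination_by j.toNat
decreasing_by omega

theorem pvS_nodup (j : Int) : (pvS j).Nodup :=
  (pvS_pairwise j).nodup

-- the high-bit peeling step: for 2^m ≤ j < 2^(m+1), pvS j splits off the top-bit element last
theorem pvS_high : ∀ (m : Nat) (j : Int), (2:Int)^m ≤ j → j < 2^(m+1) →
    pvS j = (pvS (j - 2^m)).map (· + 2^m) ++ [2^m - 1] := by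
  intro m
  induction m with
  | zero =>
    intro j h1 h2
    have : j = 1 := by omega
    subst this
    rw [pvS_pos (by omega)]
    norm_num [pvS_nonpos]
  | succ m ih =>
    intro j h1 h2
    have hH : (0:Int) < 2^m := by positivity
    have h2m1 : ((2:Int)^(m+1)) = 2 * 2^m := by ring
    have h2m2 : ((2:Int)^(m+1+1)) = 4 * 2^m := by ring
    rw [h2m1] at h1 ⊢
    rw [h2m2] at h2
    have hhalf1 : (2:Int)^m ≤ j / 2 := by omega
    have hhalf2 : j / 2 < 2^(m+1) := by rw [h2m1]; omega
    rw [pvS_pos (by omega : (0:Int) < j), ih (j / 2) hhalf1 hhalf2]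
    by_cases hz : j - 2 * 2^m ≤ 0
    · -- j = 2*2^m exactly: the low part is empty
      have hpar : ¬ j % 2 = 1 := by omega
      have hz2 : j / 2 - 2^m = 0 := by omega
      rw [hz2, pvS_nonpos le_rfl, pvS_nonpos hz]
      simp only [if_neg hpar, List.map_nil, List.nil_append, List.map_cons]
      rw [show 2 * ((2:Int)^m - 1) + 1 = 2 * 2^m - 1 from by ring]
    · have hdiv : (j - 2 * 2^m) / 2 = j / 2 - 2^m := by omega
      have hmod : (j - 2 * 2^m) % 2 = j % 2 := by omega
      rw [pvS_pos (by omega : (0:Int) < j - 2 * 2^m), hdiv, hmod]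
      have hmaps : ((pvS (j / 2 - 2^m)).map (fun e => 2 * e + 1)).map (· + 2 * 2^m)
          = ((pvS (j / 2 - 2^m)).map (· + (2:Int)^m)).map (fun e => 2 * e + 1) := by
        simp only [List.map_map, Function.comp_def]
        apply List.map_congr_left; intro e _; ring
      by_cases hpar : j % 2 = 1
      · simp only [if_pos hpar, List.map_append, List.map_cons, List.map_nil, List.nil_append,
          List.cons_append, hmaps]
        rw [show j - 2 * 2^m - 1 + 2 * 2^m = j - 1 from by ring,
          show 2 * ((2:Int)^m - 1) + 1 = 2 * 2^m - 1 from by ring]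
      · simp only [if_neg hpar, List.map_append, List.map_cons, List.map_nil, List.nil_append,
          hmaps]
        rw [show 2 * ((2:Int)^m - 1) + 1 = 2 * 2^m - 1 from by ring]

-- A's recursion computes pvS when called on a power of two bounding j
theorem pvGetA_eq_pvS : ∀ (fuel : Nat) (m : Nat) (j : Int),
    0 ≤ j → j < 2^m → (m:Nat) ≤ fuel → pvGetA fuel ((2:Int)^m) j = pvS j := by
  intro fuel
  induction fuel with
  | zero =>
    intro m j h0 h1 hm
    interval_cases m
    have : j = 0 := by omega
    subst this
    rw [pvGetA, pvS]
    norm_num [PySem.List.pyRange_zero]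
  | succ f ih =>
    intro m j h0 h1 hm
    by_cases hj1 : j ≤ 1
    · rw [pvGetA, if_pos hj1]
      interval_cases j
      · rw [pvS_nonpos le_rfl]; norm_num [PySem.List.pyRange_zero]
      · rw [pvS]
        norm_num [pvS_nonpos, PySem.List.pyRange_one_singleton]
        decide
    · -- j ≥ 2, hence m ≥ 2 ≥ 1
      have hm1 : 1 ≤ m := by
        by_contra hc
        interval_cases m; simp_all; omega
      obtain ⟨m', rfl⟩ : ∃ m', m = m' + 1 := ⟨m - 1, by omega⟩
      have hH : (0:Int) < 2^m' := by positivity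
      have hfd : PySem.Int.floordiv ((2:Int)^(m'+1)) 2 = 2^m' := by
        rw [PySem.Int.floordiv_eq_ediv_of_pos (by omega)]
        have : ((2:Int)^(m'+1)) = 2^m' * 2 := by ring
        rw [this, Int.mul_ediv_cancel _ (by omega)]
      rw [pvGetA, if_neg (by omega)]
      simp only [hfd]
      by_cases hlt : j < 2^m'
      · rw [if_pos hlt, ih m' j h0 hlt (by omega)]
      · rw [if_neg hlt]
        have hsub : pvGetA f ((2:Int)^m') (j - 2^m') = pvS (j - 2^m') := by
          have h2 : j < 2^(m'+1) := h1
          have : ((2:Int)^(m'+1)) = 2 * 2^m' := by ring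
          exact ih m' (j - 2^m') (by omega) (by omega) (by omega)
        rw [hsub]
        have hnd : ((pvS (j - 2^m')).map (· + 2^m')).Nodup :=
          (pvS_nodup _).map (add_left_injective _)
        rw [PySem.Set.ofList_eq_self_of_nodup _ hnd]
        have hnm : ((2:Int)^m' - 1) ∉ (pvS (j - 2^m')).map (· + 2^m') := by
          intro hc
          obtain ⟨b, hb, he⟩ := List.mem_map.mp hc
          have := pvS_mem_bounds _ b hb
          omega
        have hadd : PySem.Set.add ((pvS (j - 2^m')).map (· + 2^m')) ((2:Int)^m' - 1)
            = (pvS (j - 2^m')).map (· + 2^m') ++ [(2:Int)^m' - 1] := by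
          unfold PySem.Set.add
          rw [if_neg (by simpa using hnm)]
        rw [hadd, ← pvS_high m' j (by omega) h1]

-- the 'while n <= index' loop returns a power of two above index, no larger than max 1 (2*index)
theorem pvFindN_spec : ∀ (f : Nat) (n index : Int), 0 < n → index < n * 2^f →
    ∃ k : Nat, pvFindN f n index = n * 2^k ∧ index < n * 2^k ∧ (n * 2^k = n ∨ n * 2^k ≤ 2 * index) := by
  intro f
  induction f with
  | zero =>
    intro n index hn h
    exact ⟨0, by simp [pvFindN], by simpa using h, by simp⟩
  | succ f ih =>
    intro n index hn h
    rw [pvFindN]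
    by_cases hle : n ≤ index
    · rw [if_pos hle]
      obtain ⟨k, hk1, hk2, hk3⟩ := ih (n * 2) index (by omega) (by
        have : n * 2 * 2^f = n * 2^(f+1) := by ring
        rw [this]; exact h)
      refine ⟨k + 1, by rw [hk1]; ring, by rw [show n * 2^(k+1) = n * 2 * 2^k by ring]; exact hk2, ?_⟩
      right
      rcases hk3 with h3 | h3
      · rw [show n * 2^(k+1) = n * 2 * 2^k by ring, h3]; omega
      · rw [show n * 2^(k+1) = n * 2 * 2^k by ring]; exact h3
    · rw [if_neg hle]
      exact ⟨0, by simp, by simp; omega, by simp⟩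

-- B's loop appends, to any accumulator of larger elements, the elements for the bits ≥ bit
theorem pvLoopB_eq_pvS : ∀ (f : Nat) (bit index : Int) (acc : PySem.Set Int),
    0 < bit → 0 ≤ index → index < bit * 2^f →
    (∀ a ∈ acc, bit * (index / bit) ≤ a) →
    pvLoopB f bit index acc = acc ++ (pvS (index / bit)).map (fun e => bit * e + bit - 1) := by
  intro f
  induction f with
  | zero =>
    intro bit index acc hb h0 hf hacc
    have hlt : index < bit := by simpa using hf
    rw [pvLoopB, Int.ediv_eq_zero_of_lt h0 hlt, pvS_nonpos le_rfl]
    simp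
  | succ f ih =>
    intro bit index acc hb h0 hf hacc
    rw [pvLoopB]
    by_cases hle : bit ≤ index
    · rw [if_pos hle]
      rw [PySem.Int.floordiv_eq_ediv_of_pos (by omega : (0:Int) < bit),
        PySem.Int.floordiv_eq_ediv_of_pos (by omega : (0:Int) < 2 * bit),
        PySem.Int.mod_eq_emod_of_pos (by omega : (0:Int) < 2)]
      have hq1 : 1 ≤ index / bit := by
        rw [Int.le_ediv_iff_mul_le hb]; omega
      have hdd : index / (2 * bit) = index / bit / 2 := by
        rw [Int.ediv_ediv_of_nonneg (by omega : (0:Int) ≤ bit),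
          show bit * 2 = 2 * bit from by ring]
      have hfuel : index < bit * 2 * 2^f := by
        rw [show bit * 2 * 2^f = bit * 2^(f+1) from by ring]; exact hf
      by_cases hpar : (index / bit) % 2 = 1
      · rw [if_pos hpar]
        have h2q : 2 * (index / bit / 2) = index / bit - 1 := by omega
        have helem : index / (2 * bit) * (2 * bit) + bit - 1 = bit * (index / bit) - 1 := by
          rw [hdd]
          calc index / bit / 2 * (2 * bit) + bit - 1
              = (2 * (index / bit / 2)) * bit + bit - 1 := by ring
            _ = (index / bit - 1) * bit + bit - 1 := by rw [h2q]
            _ = bit * (index / bit) - 1 := by ring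
        have hkey : bit * 2 * (index / (bit * 2)) = bit * (index / bit) - bit := by
          rw [show bit * 2 = 2 * bit from by ring, hdd]
          calc 2 * bit * (index / bit / 2) = (2 * (index / bit / 2)) * bit := by ring
            _ = (index / bit - 1) * bit := by rw [h2q]
            _ = bit * (index / bit) - bit := by ring
        have hnm : (index / (2 * bit) * (2 * bit) + bit - 1) ∉ acc := by
          intro hc
          have := hacc _ hc
          omega
        have hadd : PySem.Set.add acc (index / (2 * bit) * (2 * bit) + bit - 1)
            = acc ++ [index / (2 * bit) * (2 * bit) + bit - 1] := by
          unfold PySem.Set.add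
          rw [if_neg (by simpa using hnm)]
        rw [hadd, ih (bit * 2) index _ (by omega) h0 hfuel
          (by
            intro a ha
            rw [hkey]
            rcases List.mem_append.mp ha with h | h
            · have := hacc _ h; omega
            · simp only [List.mem_singleton] at h; subst h; rw [helem]; omega)]
        rw [pvS_pos (by omega : (0:Int) < index / bit), if_pos hpar]
        rw [show bit * 2 = 2 * bit from by ring, hdd]
        simp only [List.map_map, Function.comp_def, List.map_cons, List.append_assoc,
          List.cons_append, List.nil_append]
        have helem2 : index / bit / 2 * (2 * bit) + bit - 1 = bit * (index / bit - 1) + bit - 1 := by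
          calc index / bit / 2 * (2 * bit) + bit - 1
              = (2 * (index / bit / 2)) * bit + bit - 1 := by ring
            _ = (index / bit - 1) * bit + bit - 1 := by rw [h2q]
            _ = bit * (index / bit - 1) + bit - 1 := by ring
        rw [helem2,
          List.map_congr_left (fun e _ => by ring :
            ∀ e ∈ pvS (index / bit / 2), (fun e => 2 * bit * e + 2 * bit - 1) e
              = (fun x => bit * (2 * x + 1) + bit - 1) e)]
      · rw [if_neg hpar]
        have h2q : 2 * (index / bit / 2) = index / bit := by omega
        have hkey : bit * 2 * (index / (bit * 2)) = bit * (index / bit) := by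
          rw [show bit * 2 = 2 * bit from by ring, hdd]
          calc 2 * bit * (index / bit / 2) = (2 * (index / bit / 2)) * bit := by ring
            _ = (index / bit) * bit := by rw [h2q]
            _ = bit * (index / bit) := by ring
        rw [ih (bit * 2) index acc (by omega) h0 hfuel
          (by intro a ha; rw [hkey]; exact hacc _ ha)]
        rw [pvS_pos (by omega : (0:Int) < index / bit), if_neg hpar]
        rw [show bit * 2 = 2 * bit from by ring, hdd]
        simp only [List.map_map, Function.comp_def, List.nil_append]
        congr 1
        apply List.map_congr_left; intro e _; ring
    · rw [if_neg hle]
      rw [Int.ediv_eq_zero_of_lt h0 (by omega), pvS_nonpos le_rfl]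
      simp

-- ===== VERDICT (by name: the statement is the Claim_ definition above) =====
theorem get_parity_set_spec : Claim_equal_get_parity_set := by
  intro index hdom
  unfold Spec_get_parity_set get_parity_set get_parity_set_alt
  have hdom' : -2147483648 ≤ index ∧ index ≤ 2147483648 := by
    simpa [Dom_get_parity_set, pvDomInt] using hdom
  by_cases hpos : 1 ≤ index
  · -- A side
    obtain ⟨k, hk1, hk2, hk3⟩ := pvFindN_spec 64 1 index (by omega)
      (by rw [one_mul]
          calc index ≤ 2147483648 := hdom'.2
            _ < 2^64 := by norm_num)
    simp only [one_mul] at hk1 hk2 hk3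
    have hkle : (k:Nat) ≤ 64 := by
      by_contra hc
      have h65 : (2:Int)^65 ≤ 2^k := by
        apply pow_le_pow_right₀ (by norm_num); omega
      have : (2:Int)^k ≤ 2 * index := by
        rcases hk3 with h | h
        · exfalso; rw [h] at h65; norm_num at h65
        · exact h
      have : (2:Int)^65 ≤ 2 * 2147483648 := by omega
      norm_num at this
    rw [hk1, pvGetA_eq_pvS 64 k index (by omega) hk2 hkle]
    -- B side
    rw [pvLoopB_eq_pvS 64 1 index PySem.Set.empty (by omega) (by omega)
      (by rw [one_mul]
          calc index ≤ 2147483648 := hdom'.2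
            _ < 2^64 := by norm_num)
      (by intro a ha; simp [PySem.Set.empty] at ha)]
    rw [Int.ediv_one]
    have : (pvS index).map (fun e => 1 * e + 1 - 1) = pvS index := by
      rw [List.map_congr_left (fun e _ => by omega : ∀ e ∈ pvS index, 1 * e + 1 - 1 = e)]
      exact List.map_id _
    rw [this]
    rfl
  · -- index ≤ 0: both sides are []
    have hn : pvFindN 64 1 index = 1 := by
      rw [pvFindN, if_neg (by omega)]
    rw [hn, pvGetA, if_pos (by omega), PySem.List.pyRange_one_eq_nil (by omega)]
    rw [pvLoopB, if_neg (by omega)]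
    rfl
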